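-- pv_equiv track=rewrite | github.com/superchee/CS5421 | projects/project2/project2.py | simplifyLHS
-- ===== SOURCE A (Python) =====
-- import copy
-- import itertools
--
-- def closure(R, F, S):
--     unused_F = copy.copy(F)
--     S_closure = copy.copy(S)
--
--     while len(unused_F) > 0:
--         bFind = False
--         unused_F_copy = copy.copy(unused_F)
--         for per in unused_F:
--             if set(per[0]).issubset(S_closure): #add the attributes if X in closure
--                 S_closure += list( set(per[1]) - set(S_closure) )
--                 unused_F_copy.remove(per)
--                 bFind = True
--                 break
--         if bFind == False:
--             break #break when no more attributes can be found
--         unused_F = copy.copy(unused_F_copy)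
--     return sorted(S_closure)
--
-- def simplifyLHS(R, FD, L_rhs_minimal):
--     L_lhs_minimal = []
--     for fd in L_rhs_minimal:
--         lhs = fd[0]
--         rhs = fd[1]
--         if (len(lhs) == 1):
--             L_lhs_minimal.append([lhs, rhs])
--             continue
--         bFind = False
--         for i in range(1,len(lhs)+1):
--             for itr in list(itertools.combinations(lhs,i)):
--                 if set(rhs).issubset(closure(R,FD,list(itr))):
--                     bFind = True
--                     L_lhs_minimal.append([list(itr), rhs])
--
--                     break
--             if (bFind):#break when find one simplified lhs
--                 break
--         if(not bFind): L_lhs_minimal.append([lhs, rhs])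
--     return L_lhs_minimal
-- ===== SOURCE B (Python) =====
-- from itertools import combinations
--
-- def simplifyLHS(R, FD, L_rhs_minimal):
--     # Parse the FD list once: LHS attribute sets, RHS lists, and per-FD counters.
--     lhs_sets = [set(fd[0]) for fd in FD]
--     rhs_list = [fd[1] for fd in FD]
--     base_count = [len(s) for s in lhs_sets]
--
--     def covers(seed, targets):
--         # Counter/worklist attribute closure (Beeri-Bernstein style): each
--         # closure attribute is processed once; count[j] tracks how many LHS
--         # attributes of FD j are still missing, and FD j fires when it hits 0.
--         # No subset test is ever performed inside the loop.
--         count = base_count[:]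
--         closed = set()
--         stack = list(seed)
--         for j in range(len(count)):
--             if count[j] == 0:
--                 stack.extend(rhs_list[j])
--         while stack:
--             a = stack.pop()
--             if a in closed:
--                 continue
--             closed.add(a)
--             for j in range(len(count)):
--                 if a in lhs_sets[j]:
--                     count[j] -= 1
--                     if count[j] == 0:
--                         stack.extend(rhs_list[j])
--         return set(targets) <= closed
--
--     def minimize(lhs, rhs):
--         for i in range(1, len(lhs)):
--             for c in combinations(lhs, i):
--                 if covers(c, rhs):
--                     return [list(c), rhs]
--         return [lhs, rhs]
--
--     return [minimize(fd[0], fd[1]) for fd in L_rhs_minimal]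
-- ===== Notes on version B (the rewrite author's own statement) =====
-- stated objective: alternative
-- what changed: Replaces A's closure loop, which rescans the remaining FDs with subset tests and restarts the scan after every single FD application, by the counter/worklist attribute closure (Beeri-Bernstein style): FDs are parsed once into LHS-sets/RHS-lists/counters, each closure attribute is popped from a stack and processed exactly once, decrementing per-FD missing-attribute counters, and an FD fires exactly when its counter reaches zero - no subset test is ever performed in the loop; the top-level search also drops A's redundant full-LHS combination test and singleton shortcut.
-- outside the precondition, e.g. on simplifyLHS([], [[['a']]], []): A returns [], B raises IndexError
import Mathlib
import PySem

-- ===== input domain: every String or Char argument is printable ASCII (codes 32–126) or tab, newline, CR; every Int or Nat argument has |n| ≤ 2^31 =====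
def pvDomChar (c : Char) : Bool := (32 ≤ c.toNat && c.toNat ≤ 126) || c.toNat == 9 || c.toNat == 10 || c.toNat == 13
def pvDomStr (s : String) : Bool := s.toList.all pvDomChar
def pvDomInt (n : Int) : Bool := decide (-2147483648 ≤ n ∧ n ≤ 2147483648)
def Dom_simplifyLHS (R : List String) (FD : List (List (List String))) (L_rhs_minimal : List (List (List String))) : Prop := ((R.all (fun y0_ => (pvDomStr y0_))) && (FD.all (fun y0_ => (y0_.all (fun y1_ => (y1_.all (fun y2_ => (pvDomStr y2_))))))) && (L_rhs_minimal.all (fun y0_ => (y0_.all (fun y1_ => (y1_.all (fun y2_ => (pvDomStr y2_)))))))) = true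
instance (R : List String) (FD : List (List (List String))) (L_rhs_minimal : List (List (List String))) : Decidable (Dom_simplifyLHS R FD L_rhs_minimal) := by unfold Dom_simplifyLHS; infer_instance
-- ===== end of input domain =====

-- B replaces A's restart-the-scan attribute closure (rescanning and subset-testing the
-- remaining FDs after every single application) by a counter/worklist closure that
-- processes each closure attribute once and never performs a subset test in the loop.

-- fd[0] / fd[1]; the IndexError on fds shorter than 2 is excluded by Pre_simplifyLHS
def pvGet0 (fd : List (List String)) : List String := (PySem.List.pyGet? fd 0).getD []
def pvGet1 (fd : List (List String)) : List String := (PySem.List.pyGet? fd 1).getD []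

-- itertools.combinations(l, n), lexicographic by index (exact for combinations of a list)
def pvCombos : Nat → List String → List (List String)
  | 0, _ => [[]]
  | _ + 1, [] => []
  | n + 1, x :: xs => (pvCombos n xs).map (fun c => x :: c) ++ pvCombos (n + 1) xs

-- set(xs).issubset(ys)
def pvSubsetB (xs ys : List String) : Bool := xs.all (fun y => decide (y ∈ ys))

-- ===== PORT A =====
-- A's while-loop in `closure`: find the first usable FD, apply it, remove it, restart the scan.
-- `list(set(per[1]) - set(S_closure))` is appended in Python's unspecified set order; only its
-- member set can matter (later subset tests and the final sorted() are order-insensitive), and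
-- the port appends those distinct new elements in first-occurrence order.
def pvClosLoop (unused : List (List (List String))) (Scl : List String) : List String :=
  match h : unused.find? (fun per => pvSubsetB (pvGet0 per) Scl) with
  | none => Scl
  | some per =>
      pvClosLoop (unused.erase per)
        (Scl ++ (PySem.Set.ofList (pvGet1 per)).filter (fun a => !decide (a ∈ Scl)))
  termination_by unused.length
  decreasing_by
    have hm := List.mem_of_find?_eq_some h
    have h1 := List.length_erase_of_mem hm
    have h2 := List.length_pos_of_mem hm
    omega

-- closure(R, F, S)
def pvClosure (R : List String) (F : List (List (List String))) (S : List String) : List String :=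
  PySem.List.sorted (pvClosLoop F S) (fun x => x) false

def simplifyLHS (R : List String) (FD : List (List (List String))) (L_rhs_minimal : List (List (List String))) : List (List (List String)) :=
  L_rhs_minimal.foldl (fun acc fd =>
    let lhs := pvGet0 fd
    let rhs := pvGet1 fd
    if lhs.length == 1 then acc ++ [[lhs, rhs]]
    else
      match (List.range' 1 lhs.length).findSome? (fun i =>
          (pvCombos i lhs).find? (fun itr => pvSubsetB rhs (pvClosure R FD itr))) with
      | some itr => acc ++ [[itr, rhs]]
      | none => acc ++ [[lhs, rhs]]) []

-- ===== PORT B =====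
-- lhs_sets / rhs_list / base_count, parsed once from FD (Source B's three comprehensions)
def pvLss (FD : List (List (List String))) : List (PySem.Set String) :=
  FD.map (fun fd => PySem.Set.ofList (pvGet0 fd))
def pvRhsL (FD : List (List (List String))) : List (List String) :=
  FD.map pvGet1
def pvCnt (FD : List (List (List String))) : List Int :=
  (pvLss FD).map (fun s => (s.length : Int))

-- Source B's pre-seed loop: for j: if count[j]==0: stack.extend(rhs_list[j]).
-- The stack's head is Python's top (pop() end), so extend prepends the reversed block.
def pvSeed0 : List Int → List (List String) → List String → List String
  | c :: cs, r :: rs, st => pvSeed0 cs rs (if c == 0 then r.reverse ++ st else st)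
  | _, _, st => st

-- Source B's inner for-j loop: decrement the counter of every FD whose LHS set contains a,
-- pushing rhs_list[j] when count[j] hits 0; returns (new counters, new stack)
def pvInner (a : String) : List (PySem.Set String) → List Int → List (List String) → List String →
    List Int × List String
  | ls :: lss, c :: cs, r :: rs, st =>
      if PySem.Set.contains ls a then
        let c' := c - 1
        let out := pvInner a lss cs rs (if c' == 0 then r.reverse ++ st else st)
        (c' :: out.1, out.2)
      else
        let out := pvInner a lss cs rs st
        (c :: out.1, out.2)
  | _, _, _, st => ([], st)

-- Source B's while-stack loop; the fuel argument only makes the recursion total (it is chosen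
-- large enough below and never runs out on any input)
def pvLoop (lss : List (PySem.Set String)) (rs : List (List String)) :
    Nat → List Int → PySem.Set String → List String → PySem.Set String
  | 0, _, closed, _ => closed
  | fuel + 1, count, closed, stack =>
      match stack with
      | [] => closed
      | a :: st =>
          if PySem.Set.contains closed a then pvLoop lss rs fuel count closed st
          else
            let out := pvInner a lss count rs st
            pvLoop lss rs fuel out.1 (PySem.Set.add closed a) out.2

-- covers(seed, targets)
def pvCovers (lss : List (PySem.Set String)) (rs : List (List String)) (cnt : List Int)
    (seed targets : List String) : Bool :=
  let T := rs.flatten.length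
  let closed := pvLoop lss rs ((seed.length + T) * (T + 3) + 1) cnt PySem.Set.empty
      (pvSeed0 cnt rs seed.reverse)
  PySem.Set.issubset (PySem.Set.ofList targets) closed

def simplifyLHS_alt (R : List String) (FD : List (List (List String))) (L_rhs_minimal : List (List (List String))) : List (List (List String)) :=
  L_rhs_minimal.map (fun fd =>
    let lhs := pvGet0 fd
    let rhs := pvGet1 fd
    match (List.range' 1 (lhs.length - 1)).findSome? (fun i =>
        (pvCombos i lhs).find? (fun c => pvCovers (pvLss FD) (pvRhsL FD) (pvCnt FD) c rhs)) with
    | some c => [c, rhs]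
    | none => [lhs, rhs])

-- ===== PRECONDITION & SPEC =====
-- Pre_ excludes malformed FD entries (fewer than two components, in FD or in L_rhs_minimal):
-- A raises IndexError whenever it touches such an entry, and B, which parses FD eagerly once,
-- raises IndexError on every such input — including those where A's lazy loop never reads FD
-- (e.g. an empty L_rhs_minimal) and A still returns a value.
def Pre_simplifyLHS (R : List String) (FD : List (List (List String))) (L_rhs_minimal : List (List (List String))) : Prop :=
  (∀ fd ∈ FD, 2 ≤ fd.length) ∧ (∀ fd ∈ L_rhs_minimal, 2 ≤ fd.length)
instance (R : List String) (FD : List (List (List String))) (L_rhs_minimal : List (List (List String))) : Decidable (Pre_simplifyLHS R FD L_rhs_minimal) := by unfold Pre_simplifyLHS; infer_instance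

def pvWitness_simplifyLHS : List String × List (List (List String)) × List (List (List String)) :=
  (["A", "B", "C"], [[["A"], ["B"]], [["B"], ["C"]]], [[["A", "B"], ["C"]]])

def Spec_simplifyLHS (R : List String) (FD : List (List (List String))) (L_rhs_minimal : List (List (List String))) (out : List (List (List String))) : Prop := out = simplifyLHS_alt R FD L_rhs_minimal
instance (R : List String) (FD : List (List (List String))) (L_rhs_minimal : List (List (List String))) (out : List (List (List String))) : Decidable (Spec_simplifyLHS R FD L_rhs_minimal out) := by unfold Spec_simplifyLHS; infer_instance

-- ===== CLAIM (what is proved, stated in full; the proofs are below) =====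
def Claim_equal_simplifyLHS : Prop := ∀ (R : List String) (FD : List (List (List String))) (L_rhs_minimal : List (List (List String))), Dom_simplifyLHS R FD L_rhs_minimal → Pre_simplifyLHS R FD L_rhs_minimal → Spec_simplifyLHS R FD L_rhs_minimal (simplifyLHS R FD L_rhs_minimal)

-- ===== LEMMAS AND PROOFS =====

-- x is derivable from S under the FD pairs P (the attribute closure, as a predicate)
inductive pvDer (P : List (List String × List String)) (S : List String) : String → Prop
  | base {x} : x ∈ S → pvDer P S x
  | step {l r x} : (l, r) ∈ P → (∀ y ∈ l, pvDer P S y) → x ∈ r → pvDer P S x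

def pvPairs (FD : List (List (List String))) : List (List String × List String) :=
  FD.map (fun fd => (pvGet0 fd, pvGet1 fd))

theorem pvDer_min {P : List (List String × List String)} {S C : List String}
    (hS : ∀ x ∈ S, x ∈ C)
    (hC : ∀ p ∈ P, (∀ y ∈ p.1, y ∈ C) → ∀ y ∈ p.2, y ∈ C) :
    ∀ x, pvDer P S x → x ∈ C := by
  intro x h
  induction h with
  | base hx => exact hS _ hx
  | step hp _ hr ih => exact hC _ hp (fun y hy => ih y hy) _ hr

-- ---- A side ----

theorem pvClosLoop_sub (unused : List (List (List String))) (Scl : List String) :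
    ∀ x ∈ Scl, x ∈ pvClosLoop unused Scl := by
  induction unused, Scl using pvClosLoop.induct with
  | case1 unused Scl h => rw [pvClosLoop, h]; intro x hx; exact hx
  | case2 unused Scl per h ih =>
    rw [pvClosLoop, h]
    intro x hx
    exact ih x (List.mem_append_left _ hx)

theorem pvClosLoop_closed (unused : List (List (List String))) (Scl : List String) :
    ∀ per ∈ unused, (∀ y ∈ pvGet0 per, y ∈ pvClosLoop unused Scl) →
      ∀ y ∈ pvGet1 per, y ∈ pvClosLoop unused Scl := by
  induction unused, Scl using pvClosLoop.induct with
  | case1 unused Scl h =>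
    rw [pvClosLoop, h]
    intro per hper hsub
    have := List.find?_eq_none.mp h per hper
    simp only [pvSubsetB, List.all_eq_true, decide_eq_true_eq] at this
    exact absurd hsub this
  | case2 unused Scl per h ih =>
    rw [pvClosLoop, h]
    intro q hq hsub
    by_cases hqe : q ∈ unused.erase per
    · exact ih q hqe hsub
    · have hq_eq : q = per := by
        by_contra hne
        exact hqe ((List.mem_erase_of_ne hne).mpr hq)
      subst hq_eq
      intro y hy
      apply pvClosLoop_sub
      by_cases hyS : y ∈ Scl
      · exact List.mem_append_left _ hyS
      · refine List.mem_append_right _ ?_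
        simp only [List.mem_filter, Bool.not_eq_eq_eq_not, Bool.not_true, decide_eq_false_iff_not]
        exact ⟨(PySem.Set.mem_ofList _ _).mpr hy, hyS⟩

theorem pvClosLoop_sound (P : List (List String × List String)) (S : List String)
    (unused : List (List (List String))) (Scl : List String)
    (hU : ∀ per ∈ unused, (pvGet0 per, pvGet1 per) ∈ P)
    (hS : ∀ x ∈ Scl, pvDer P S x) :
    ∀ x ∈ pvClosLoop unused Scl, pvDer P S x := by
  induction unused, Scl using pvClosLoop.induct with
  | case1 unused Scl h => rw [pvClosLoop, h]; exact hS
  | case2 unused Scl per h ih =>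
    rw [pvClosLoop, h]
    have hper : per ∈ unused := List.mem_of_find?_eq_some h
    have hsubs : ∀ y ∈ pvGet0 per, y ∈ Scl := by
      have := List.find?_some h
      simpa only [pvSubsetB, List.all_eq_true, decide_eq_true_eq] using this
    refine ih (fun q hq => hU q (List.mem_of_mem_erase hq)) ?_
    intro x hx
    rcases List.mem_append.mp hx with hx | hx
    · exact hS x hx
    · have hx' : x ∈ pvGet1 per := by
        have := List.mem_filter.mp hx
        exact (PySem.Set.mem_ofList _ _).mp this.1
      exact pvDer.step (hU per hper) (fun y hy => hS y (hsubs y hy)) hx'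

theorem mem_closA (R : List String) (FD : List (List (List String))) (S : List String)
    (x : String) : x ∈ pvClosure R FD S ↔ pvDer (pvPairs FD) S x := by
  rw [pvClosure, PySem.List.mem_sorted]
  constructor
  · exact fun hx => pvClosLoop_sound (pvPairs FD) S FD S
      (fun per hper => List.mem_map.mpr ⟨per, hper, rfl⟩) (fun y hy => pvDer.base hy) x hx
  · refine pvDer_min (pvClosLoop_sub FD S) ?_ x
    intro p hp hsub
    rcases List.mem_map.mp hp with ⟨fd, hfd, rfl⟩
    exact pvClosLoop_closed FD S fd hfd hsub

-- ---- B side: the counter/worklist closure ----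

-- |ls \ closed| (what count[j] tracks)
def pvCountOf (closed : PySem.Set String) (ls : PySem.Set String) : Int :=
  ((ls.filter (fun x => !PySem.Set.contains closed x)).length : Int)

theorem containsAddNe (closed : PySem.Set String) (a y : String) (hy : y ≠ a) :
    PySem.Set.contains (PySem.Set.add closed a) y = PySem.Set.contains closed y := by
  rw [Bool.eq_iff_iff, PySem.Set.contains_iff, PySem.Set.contains_iff, PySem.Set.mem_add]
  constructor
  · rintro (h | h)
    · exact h
    · exact absurd h hy
  · exact Or.inl

theorem countOf_empty (ls : PySem.Set String) :
    pvCountOf PySem.Set.empty ls = (ls.length : Int) := by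
  unfold pvCountOf
  have hf : ls.filter (fun x => !PySem.Set.contains PySem.Set.empty x) = ls := by
    refine List.filter_eq_self.mpr (fun a _ => ?_)
    simp [PySem.Set.contains_eq_listContains, PySem.Set.empty]
  rw [hf]

theorem countOf_add (closed ls : PySem.Set String) (a : String)
    (hnd : ls.Nodup) (ha : a ∉ closed) :
    pvCountOf (PySem.Set.add closed a) ls =
      pvCountOf closed ls - (if a ∈ ls then 1 else 0) := by
  induction ls with
  | nil => simp [pvCountOf]
  | cons x xs ih =>
    have hx : x ∉ xs := (List.nodup_cons.mp hnd).1
    have hnd' : xs.Nodup := (List.nodup_cons.mp hnd).2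
    by_cases hxa : x = a
    · subst hxa
      have h1 : PySem.Set.contains (PySem.Set.add closed x) x = true := by
        rw [PySem.Set.contains_iff, PySem.Set.mem_add]; exact Or.inr rfl
      have h2 : PySem.Set.contains closed x = false := by
        rw [Bool.eq_false_iff]; intro h; exact ha ((PySem.Set.contains_iff _ _).mp h)
      have hcong : xs.filter (fun y => !PySem.Set.contains (PySem.Set.add closed x) y) =
          xs.filter (fun y => !PySem.Set.contains closed y) := by
        apply List.filter_congr
        intro y hy
        rw [containsAddNe closed x y (fun h => hx (h ▸ hy))]
      have hb1 : (!PySem.Set.contains (PySem.Set.add closed x) x) = false := by rw [h1]; rfl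
      have hb2 : (!PySem.Set.contains closed x) = true := by rw [h2]; rfl
      have hL : (x :: xs).filter (fun y => !PySem.Set.contains (PySem.Set.add closed x) y)
          = xs.filter (fun y => !PySem.Set.contains closed y) := by
        rw [List.filter_cons, hb1, if_neg Bool.false_ne_true, hcong]
      have hR : (x :: xs).filter (fun y => !PySem.Set.contains closed y)
          = x :: xs.filter (fun y => !PySem.Set.contains closed y) := by
        rw [List.filter_cons, hb2, if_pos rfl]
      rw [pvCountOf, pvCountOf, hL, hR, if_pos (List.mem_cons_self ..), List.length_cons]
      push_cast
      ring
    · have hcont : PySem.Set.contains (PySem.Set.add closed a) x =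
          PySem.Set.contains closed x := containsAddNe closed a x hxa
      have hmem : (a ∈ x :: xs) = (a ∈ xs) := propext (by
        rw [List.mem_cons]
        exact or_iff_right (fun h => hxa h.symm))
      have ihx := ih hnd'
      rw [pvCountOf, pvCountOf] at ihx
      cases hc : PySem.Set.contains closed x with
      | true =>
        have hb1 : (!PySem.Set.contains (PySem.Set.add closed a) x) = false := by
          rw [hcont, hc]; rfl
        have hb2 : (!PySem.Set.contains closed x) = false := by rw [hc]; rfl
        have hL : (x :: xs).filter (fun y => !PySem.Set.contains (PySem.Set.add closed a) y)
            = xs.filter (fun y => !PySem.Set.contains (PySem.Set.add closed a) y) := by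
          rw [List.filter_cons, hb1, if_neg Bool.false_ne_true]
        have hR : (x :: xs).filter (fun y => !PySem.Set.contains closed y)
            = xs.filter (fun y => !PySem.Set.contains closed y) := by
          rw [List.filter_cons, hb2, if_neg Bool.false_ne_true]
        rw [pvCountOf, pvCountOf, hL, hR]
        simp only [hmem]
        exact ihx
      | false =>
        have hb1 : (!PySem.Set.contains (PySem.Set.add closed a) x) = true := by
          rw [hcont, hc]; rfl
        have hb2 : (!PySem.Set.contains closed x) = true := by rw [hc]; rfl
        have hL : (x :: xs).filter (fun y => !PySem.Set.contains (PySem.Set.add closed a) y)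
            = x :: xs.filter (fun y => !PySem.Set.contains (PySem.Set.add closed a) y) := by
          rw [List.filter_cons, hb1, if_pos rfl]
        have hR : (x :: xs).filter (fun y => !PySem.Set.contains closed y)
            = x :: xs.filter (fun y => !PySem.Set.contains closed y) := by
          rw [List.filter_cons, hb2, if_pos rfl]
        rw [pvCountOf, pvCountOf, hL, hR, List.length_cons, List.length_cons]
        simp only [hmem]
        push_cast at ihx ⊢
        omega

theorem countOf_eq_zero (closed ls : PySem.Set String) :
    pvCountOf closed ls = 0 ↔ ∀ x ∈ ls, x ∈ closed := by
  unfold pvCountOf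
  rw [Int.natCast_eq_zero, List.length_eq_zero_iff, List.filter_eq_nil_iff]
  constructor
  · intro h x hx
    have hh := h x hx
    cases hcx : PySem.Set.contains closed x with
    | true => exact (PySem.Set.contains_iff _ _).mp hcx
    | false => exact absurd (by rw [hcx]; rfl) hh
  · intro h x hx
    rw [(PySem.Set.contains_iff _ _).mpr (h x hx)]
    decide

-- ---- pvSeed0 facts ----

theorem pvSeed0_nil1 (rs : List (List String)) (st : List String) : pvSeed0 [] rs st = st := rfl

theorem pvSeed0_nil2 (cs : List Int) (st : List String) : pvSeed0 cs [] st = st := by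
  cases cs <;> rfl

theorem pvSeed0_cons (c : Int) (cs : List Int) (r : List String) (rs : List (List String))
    (st : List String) :
    pvSeed0 (c :: cs) (r :: rs) st = pvSeed0 cs rs (if c == 0 then r.reverse ++ st else st) := rfl

theorem pvSeed0_mono (cs : List Int) (rs : List (List String)) (st : List String) :
    ∀ x ∈ st, x ∈ pvSeed0 cs rs st := by
  induction cs generalizing rs st with
  | nil => intro x hx; rw [pvSeed0_nil1]; exact hx
  | cons c cs ih =>
    intro x hx
    cases rs with
    | nil => rw [pvSeed0_nil2]; exact hx
    | cons r rs =>
      rw [pvSeed0_cons]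
      apply ih
      split
      · exact List.mem_append_right _ hx
      · exact hx

theorem pvSeed0_fire (cs : List Int) (rs : List (List String)) (st : List String) :
    ∀ (i : Nat) (r : List String), cs[i]? = some (0 : Int) → rs[i]? = some r → ∀ x ∈ r, x ∈ pvSeed0 cs rs st := by
  induction cs generalizing rs st with
  | nil => intro i r hc; simp at hc
  | cons c cs ih =>
    intro i r' hc hr x hx
    cases rs with
    | nil => simp at hr
    | cons r rs =>
      rw [pvSeed0_cons]
      cases i with
      | zero =>
        simp only [List.getElem?_cons_zero, Option.some_inj] at hc hr
        subst hc; subst hr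
        apply pvSeed0_mono
        rw [if_pos (by decide)]
        exact List.mem_append_left _ (List.mem_reverse.mpr hx)
      | succ j =>
        simp only [List.getElem?_cons_succ] at hc hr
        exact ih rs _ j r' hc hr x hx

theorem pvSeed0_mem (cs : List Int) (rs : List (List String)) (st : List String) :
    ∀ x ∈ pvSeed0 cs rs st,
      x ∈ st ∨ ∃ (i : Nat) (r : List String), cs[i]? = some (0 : Int) ∧ rs[i]? = some r ∧ x ∈ r := by
  induction cs generalizing rs st with
  | nil => intro x hx; rw [pvSeed0_nil1] at hx; exact Or.inl hx
  | cons c cs ih =>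
    intro x hx
    cases rs with
    | nil => rw [pvSeed0_nil2] at hx; exact Or.inl hx
    | cons r rs =>
      rw [pvSeed0_cons] at hx
      rcases ih rs _ x hx with h | ⟨i, r', h1, h2, h3⟩
      · by_cases hc : (c == (0 : Int)) = true
        · rw [if_pos hc] at h
          rcases List.mem_append.mp h with h | h
          · exact Or.inr ⟨0, r, by simp [beq_iff_eq.mp hc], by simp, List.mem_reverse.mp h⟩
          · exact Or.inl h
        · rw [if_neg hc] at h
          exact Or.inl h
      · exact Or.inr ⟨i + 1, r', by simpa using h1, by simpa using h2, h3⟩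

theorem pvSeed0_len (cs : List Int) (rs : List (List String)) (st : List String) :
    (pvSeed0 cs rs st).length ≤ st.length + rs.flatten.length := by
  induction cs generalizing rs st with
  | nil => rw [pvSeed0_nil1]; omega
  | cons c cs ih =>
    cases rs with
    | nil => rw [pvSeed0_nil2]; omega
    | cons r rs =>
      rw [pvSeed0_cons]
      refine le_trans (ih rs _) ?_
      have hst : (if c == 0 then r.reverse ++ st else st).length ≤ r.length + st.length := by
        split
        · simp
        · omega
      simp only [List.flatten_cons, List.length_append]
      omega

-- ---- pvInner facts ----

theorem pvInner_nil1 (a : String) (cs : List Int) (rs : List (List String)) (st : List String) :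
    pvInner a [] cs rs st = ([], st) := rfl

theorem pvInner_nil2 (a : String) (lss : List (PySem.Set String)) (rs : List (List String))
    (st : List String) : pvInner a lss [] rs st = ([], st) := by
  cases lss <;> rfl

theorem pvInner_nil3 (a : String) (lss : List (PySem.Set String)) (cs : List Int)
    (st : List String) : pvInner a lss cs [] st = ([], st) := by
  cases lss <;> cases cs <;> rfl

theorem pvInner_cons (a : String) (ls : PySem.Set String) (lss : List (PySem.Set String))
    (c : Int) (cs : List Int) (r : List String) (rs : List (List String)) (st : List String) :
    pvInner a (ls :: lss) (c :: cs) (r :: rs) st =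
      if PySem.Set.contains ls a then
        ((c - 1) :: (pvInner a lss cs rs (if c - 1 == 0 then r.reverse ++ st else st)).1,
          (pvInner a lss cs rs (if c - 1 == 0 then r.reverse ++ st else st)).2)
      else
        (c :: (pvInner a lss cs rs st).1, (pvInner a lss cs rs st).2) := rfl

theorem pvInner_len (a : String) (lss : List (PySem.Set String)) (cs : List Int)
    (rs : List (List String)) (st : List String) (h1 : lss.length = cs.length)
    (h2 : cs.length = rs.length) : (pvInner a lss cs rs st).1.length = cs.length := by
  induction lss generalizing cs rs st with
  | nil =>
    cases cs with
    | nil => simp [pvInner_nil1]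
    | cons c cs => simp at h1
  | cons ls lss ih =>
    cases cs with
    | nil => simp at h1
    | cons c cs =>
      cases rs with
      | nil => simp at h2
      | cons r rs =>
        rw [pvInner_cons]
        split <;> simp [ih _ _ _ (by simpa using h1) (by simpa using h2)]

theorem pvInner_get (a : String) (lss : List (PySem.Set String)) (cs : List Int)
    (rs : List (List String)) (st : List String) (i : Nat) (ls : PySem.Set String) (c : Int)
    (h1 : lss.length = cs.length) (h2 : cs.length = rs.length)
    (hls : lss[i]? = some ls) (hc : cs[i]? = some c) :
    (pvInner a lss cs rs st).1[i]? = some (if PySem.Set.contains ls a then c - 1 else c) := by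
  induction lss generalizing cs rs st i with
  | nil => simp at hls
  | cons ls0 lss ih =>
    cases cs with
    | nil => simp at hc
    | cons c0 cs =>
      cases rs with
      | nil => simp at h2
      | cons r rs =>
        rw [pvInner_cons]
        cases i with
        | zero =>
          simp only [List.getElem?_cons_zero, Option.some_inj] at hls hc
          subst hls; subst hc
          split <;> simp_all
        | succ j =>
          simp only [List.getElem?_cons_succ] at hls hc
          split <;> simpa using ih _ _ _ _ (by simpa using h1) (by simpa using h2) hls hc

theorem pvInner_st_mono (a : String) (lss : List (PySem.Set String)) (cs : List Int)
    (rs : List (List String)) (st : List String) :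
    ∀ x ∈ st, x ∈ (pvInner a lss cs rs st).2 := by
  induction lss generalizing cs rs st with
  | nil => intro x hx; rw [pvInner_nil1]; exact hx
  | cons ls lss ih =>
    intro x hx
    cases cs with
    | nil => rw [pvInner_nil2]; exact hx
    | cons c cs =>
      cases rs with
      | nil => rw [pvInner_nil3]; exact hx
      | cons r rs =>
        rw [pvInner_cons]
        split
        · apply ih
          split
          · exact List.mem_append_right _ hx
          · exact hx
        · exact ih _ _ _ x hx

theorem pvInner_st_mem (a : String) (lss : List (PySem.Set String)) (cs : List Int)
    (rs : List (List String)) (st : List String) :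
    ∀ x ∈ (pvInner a lss cs rs st).2,
      x ∈ st ∨ ∃ (i : Nat) (ls : PySem.Set String) (c : Int) (r : List String), lss[i]? = some ls ∧ cs[i]? = some c ∧ rs[i]? = some r ∧
        PySem.Set.contains ls a = true ∧ c - 1 = 0 ∧ x ∈ r := by
  induction lss generalizing cs rs st with
  | nil => intro x hx; rw [pvInner_nil1] at hx; exact Or.inl hx
  | cons ls lss ih =>
    intro x hx
    cases cs with
    | nil => rw [pvInner_nil2] at hx; exact Or.inl hx
    | cons c cs =>
      cases rs with
      | nil => rw [pvInner_nil3] at hx; exact Or.inl hx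
      | cons r rs =>
        rw [pvInner_cons] at hx
        by_cases hb : PySem.Set.contains ls a = true
        · rw [if_pos hb] at hx
          rcases ih _ _ _ x hx with h | ⟨i, ls', c', r', m1, m2, m3, m4, m5, m6⟩
          · by_cases h0 : (c - 1 == (0 : Int)) = true
            · rw [if_pos h0] at h
              rcases List.mem_append.mp h with h | h
              · exact Or.inr ⟨0, ls, c, r, by simp, by simp, by simp, hb,
                  beq_iff_eq.mp h0, List.mem_reverse.mp h⟩
              · exact Or.inl h
            · rw [if_neg h0] at h
              exact Or.inl h
          · exact Or.inr ⟨i + 1, ls', c', r', by simpa using m1, by simpa using m2,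
              by simpa using m3, m4, m5, m6⟩
        · rw [if_neg hb] at hx
          rcases ih _ _ _ x hx with h | ⟨i, ls', c', r', m1, m2, m3, m4, m5, m6⟩
          · exact Or.inl h
          · exact Or.inr ⟨i + 1, ls', c', r', by simpa using m1, by simpa using m2,
              by simpa using m3, m4, m5, m6⟩

theorem pvInner_st_len (a : String) (lss : List (PySem.Set String)) (cs : List Int)
    (rs : List (List String)) (st : List String) :
    (pvInner a lss cs rs st).2.length ≤ st.length + rs.flatten.length := by
  induction lss generalizing cs rs st with
  | nil => rw [pvInner_nil1]; exact Nat.le_add_right _ _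
  | cons ls lss ih =>
    cases cs with
    | nil => rw [pvInner_nil2]; exact Nat.le_add_right _ _
    | cons c cs =>
      cases rs with
      | nil => rw [pvInner_nil3]; exact Nat.le_add_right _ _
      | cons r rs =>
        rw [pvInner_cons]
        have hst : (if c - 1 == 0 then r.reverse ++ st else st).length ≤ r.length + st.length := by
          split
          · simp
          · omega
        have h1 := ih cs rs (if c - 1 == 0 then r.reverse ++ st else st)
        have h2 := ih cs rs st
        split
        · simp only [List.flatten_cons, List.length_append]
          omega
        · simp only [List.flatten_cons, List.length_append]
          omega

theorem pvInner_fire (a : String) (lss : List (PySem.Set String)) (cs : List Int)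
    (rs : List (List String)) (st : List String) (i : Nat) (ls : PySem.Set String) (c : Int)
    (r : List String) (hls : lss[i]? = some ls) (hc : cs[i]? = some c) (hr : rs[i]? = some r)
    (hb : PySem.Set.contains ls a = true) (h0 : c - 1 = 0) :
    ∀ x ∈ r, x ∈ (pvInner a lss cs rs st).2 := by
  induction lss generalizing cs rs st i with
  | nil => simp at hls
  | cons ls0 lss ih =>
    intro x hx
    cases cs with
    | nil => simp at hc
    | cons c0 cs =>
      cases rs with
      | nil => simp at hr
      | cons r0 rs =>
        rw [pvInner_cons]
        cases i with
        | zero =>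
          simp only [List.getElem?_cons_zero, Option.some_inj] at hls hc hr
          subst hls; subst hc; subst hr
          rw [if_pos hb]
          apply pvInner_st_mono
          rw [if_pos (beq_iff_eq.mpr h0)]
          exact List.mem_append_left _ (List.mem_reverse.mpr hx)
        | succ j =>
          simp only [List.getElem?_cons_succ] at hls hc hr
          split
          · exact ih _ _ _ j hls hc hr x hx
          · exact ih _ _ _ j hls hc hr x hx

-- ---- the potential-counting lemma for fuel sufficiency ----

theorem countP_drop (l : List String) (p q : String → Bool) (a : String)
    (ha : a ∈ l) (hq : ∀ x, q x = true → p x = true) (hpa : p a = true) (hqa : q a = false) :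
    l.countP q + 1 ≤ l.countP p := by
  induction l with
  | nil => cases ha
  | cons h t ih =>
    rcases List.mem_cons.mp ha with rfl | hat
    · have hmono : t.countP q ≤ t.countP p := List.countP_mono_left (fun x _ hx => hq x hx)
      rw [List.countP_cons_of_pos hpa, List.countP_cons_of_neg (by rw [hqa]; simp)]
      omega
    · have hrec := ih hat
      by_cases hqh : q h = true
      · rw [List.countP_cons_of_pos (hq h hqh), List.countP_cons_of_pos hqh]
        omega
      · rw [List.countP_cons_of_neg hqh]
        by_cases hph : p h = true
        · rw [List.countP_cons_of_pos hph]
          omega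
        · rw [List.countP_cons_of_neg hph]
          omega

-- ---- the main worklist-loop invariant ----

theorem pvLoop_zero (lss : List (PySem.Set String)) (rs : List (List String)) (count : List Int)
    (closed : PySem.Set String) (stack : List String) :
    pvLoop lss rs 0 count closed stack = closed := rfl

theorem pvLoop_succ_nil (lss : List (PySem.Set String)) (rs : List (List String)) (fuel : Nat)
    (count : List Int) (closed : PySem.Set String) :
    pvLoop lss rs (fuel + 1) count closed [] = closed := rfl

theorem pvLoop_succ_cons (lss : List (PySem.Set String)) (rs : List (List String)) (fuel : Nat)
    (count : List Int) (closed : PySem.Set String) (a : String) (st : List String) :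
    pvLoop lss rs (fuel + 1) count closed (a :: st) =
      if PySem.Set.contains closed a then pvLoop lss rs fuel count closed st
      else pvLoop lss rs fuel (pvInner a lss count rs st).1 (PySem.Set.add closed a)
        (pvInner a lss count rs st).2 := rfl

-- the end-state: counters at zero mean the closed set is saturated
theorem pvLoop_post (FD : List (List (List String))) (count : List Int)
    (closed : PySem.Set String) (hlen : count.length = FD.length)
    (hcnt : ∀ (i : Nat) (ls : PySem.Set String) (c : Int), (pvLss FD)[i]? = some ls → count[i]? = some c → c = pvCountOf closed ls)
    (hfired : ∀ (i : Nat) (c : Int) (r : List String), count[i]? = some c → (pvRhsL FD)[i]? = some r → c = 0 →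
        ∀ x ∈ r, x ∈ closed) :
    ∀ fd ∈ FD, (∀ y ∈ pvGet0 fd, y ∈ closed) → ∀ y ∈ pvGet1 fd, y ∈ closed := by
  intro fd hfd hsub y hy
  obtain ⟨i, hfdi⟩ := List.mem_iff_getElem?.mp hfd
  have hiFD : i < FD.length := (List.getElem?_eq_some_iff.mp hfdi).1
  have hls : (pvLss FD)[i]? = some (PySem.Set.ofList (pvGet0 fd)) := by
    rw [pvLss, List.getElem?_map, hfdi]; rfl
  have hr : (pvRhsL FD)[i]? = some (pvGet1 fd) := by
    rw [pvRhsL, List.getElem?_map, hfdi]; rfl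
  have hic : i < count.length := by omega
  have hc : count[i]? = some count[i] := List.getElem?_eq_getElem hic
  have h0 : count[i] = 0 := by
    rw [hcnt i _ _ hls hc, countOf_eq_zero]
    intro x hx
    exact hsub x ((PySem.Set.mem_ofList _ _).mp hx)
  exact hfired i _ _ hc hr h0 y hy

theorem pvLoop_go (FD : List (List (List String))) (S BL : List String)
    (hBLr : ∀ fd ∈ FD, ∀ x ∈ pvGet1 fd, x ∈ BL) :
    ∀ (fuel : Nat) (count : List Int) (closed : PySem.Set String) (stack : List String),
    count.length = FD.length →
    (∀ (i : Nat) (ls : PySem.Set String) (c : Int), (pvLss FD)[i]? = some ls → count[i]? = some c → c = pvCountOf closed ls) →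
    (∀ (i : Nat) (c : Int) (r : List String), count[i]? = some c → (pvRhsL FD)[i]? = some r → c = 0 →
        ∀ x ∈ r, x ∈ closed ∨ x ∈ stack) →
    (∀ x, x ∈ closed ∨ x ∈ stack → pvDer (pvPairs FD) S x) →
    (∀ x ∈ stack, x ∈ BL) →
    BL.countP (fun x => !PySem.Set.contains closed x) * ((pvRhsL FD).flatten.length + 2)
        + stack.length ≤ fuel →
    (∀ x ∈ closed, x ∈ pvLoop (pvLss FD) (pvRhsL FD) fuel count closed stack) ∧
    (∀ x ∈ stack, x ∈ pvLoop (pvLss FD) (pvRhsL FD) fuel count closed stack) ∧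
    (∀ x ∈ pvLoop (pvLss FD) (pvRhsL FD) fuel count closed stack, pvDer (pvPairs FD) S x) ∧
    (∀ fd ∈ FD, (∀ y ∈ pvGet0 fd, y ∈ pvLoop (pvLss FD) (pvRhsL FD) fuel count closed stack) →
        ∀ y ∈ pvGet1 fd, y ∈ pvLoop (pvLss FD) (pvRhsL FD) fuel count closed stack) := by
  intro fuel
  induction fuel with
  | zero =>
    intro count closed stack hlen hcnt hfired hsound hBL hfuel
    have hstack : stack = [] := by
      cases stack with
      | nil => rfl
      | cons a st => simp at hfuel
    subst hstack
    rw [pvLoop_zero]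
    exact ⟨fun x hx => hx, by simp, fun x hx => hsound x (Or.inl hx),
      pvLoop_post FD count closed hlen hcnt
        (fun i c r h1 h2 h3 x hx => (hfired i c r h1 h2 h3 x hx).resolve_right (by simp))⟩
  | succ fuel ih =>
    intro count closed stack hlen hcnt hfired hsound hBL hfuel
    cases stack with
    | nil =>
      rw [pvLoop_succ_nil]
      exact ⟨fun x hx => hx, by simp, fun x hx => hsound x (Or.inl hx),
        pvLoop_post FD count closed hlen hcnt
          (fun i c r h1 h2 h3 x hx => (hfired i c r h1 h2 h3 x hx).resolve_right (by simp))⟩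
    | cons a st =>
      rw [pvLoop_succ_cons]
      by_cases hca : PySem.Set.contains closed a = true
      · rw [if_pos hca]
        have hac : a ∈ closed := (PySem.Set.contains_iff _ _).mp hca
        obtain ⟨IH1, IH2, IH3, IH4⟩ := ih count closed st hlen hcnt
          (fun i c r h1 h2 h3 x hx => by
            rcases hfired i c r h1 h2 h3 x hx with h | h
            · exact Or.inl h
            · rcases List.mem_cons.mp h with rfl | h
              · exact Or.inl hac
              · exact Or.inr h)
          (fun x hx => hsound x (by
            rcases hx with h | h
            · exact Or.inl h
            · exact Or.inr (List.mem_cons_of_mem _ h)))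
          (fun x hx => hBL x (List.mem_cons_of_mem _ hx))
          (by simp only [List.length_cons] at hfuel; omega)
        refine ⟨IH1, ?_, IH3, IH4⟩
        intro x hx
        rcases List.mem_cons.mp hx with rfl | hx
        · exact IH1 x hac
        · exact IH2 x hx
      · rw [if_neg hca]
        have ha : a ∉ closed := fun h => hca ((PySem.Set.contains_iff _ _).mpr h)
        have hl1 : (pvLss FD).length = count.length := by simp [pvLss, hlen]
        have hl2 : count.length = (pvRhsL FD).length := by simp [pvRhsL, hlen]
        have houtlen : (pvInner a (pvLss FD) count (pvRhsL FD) st).1.length = count.length :=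
          pvInner_len a _ _ _ _ hl1 hl2
        -- unpacking a pvLss entry
        have hunls : ∀ (i : Nat) (ls : PySem.Set String), (pvLss FD)[i]? = some ls →
            ∃ fd, FD[i]? = some fd ∧ ls = PySem.Set.ofList (pvGet0 fd) := by
          intro i ls hls
          rw [pvLss, List.getElem?_map] at hls
          rcases Option.map_eq_some_iff.mp hls with ⟨fd, hfd, heq⟩
          exact ⟨fd, hfd, heq.symm⟩
        -- new count invariant
        have hcnt' : ∀ (i : Nat) (ls : PySem.Set String) (c : Int), (pvLss FD)[i]? = some ls →
            (pvInner a (pvLss FD) count (pvRhsL FD) st).1[i]? = some c →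
            c = pvCountOf (PySem.Set.add closed a) ls := by
          intro i ls c' hls hc'
          have hic : i < count.length := by
            have := (List.getElem?_eq_some_iff.mp hc').1
            omega
          have hc : count[i]? = some count[i] := List.getElem?_eq_getElem hic
          have hgot := pvInner_get a _ _ _ st i ls count[i] hl1 hl2 hls hc
          rw [hgot, Option.some_inj] at hc'
          obtain ⟨fd, hfd, rfl⟩ := hunls i ls hls
          have hnd : (PySem.Set.ofList (pvGet0 fd)).Nodup := PySem.Set.nodup_ofList _
          rw [countOf_add closed _ a hnd ha, ← hcnt i _ _ hls hc]
          cases hb : PySem.Set.contains (PySem.Set.ofList (pvGet0 fd)) a with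
          | true =>
            rw [if_pos ((PySem.Set.contains_iff _ _).mp hb)]
            simp only [hb, if_true] at hc'
            omega
          | false =>
            have hnm : a ∉ PySem.Set.ofList (pvGet0 fd) := fun h =>
              by rw [(PySem.Set.contains_iff _ _).mpr h] at hb; cases hb
            rw [if_neg hnm]
            simp only [hb, Bool.false_eq_true, if_false] at hc'
            omega
        -- new fired invariant
        have hfired' : ∀ (i : Nat) (c : Int) (r : List String), (pvInner a (pvLss FD) count (pvRhsL FD) st).1[i]? = some c →
            (pvRhsL FD)[i]? = some r → c = 0 →
            ∀ x ∈ r, x ∈ PySem.Set.add closed a ∨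
              x ∈ (pvInner a (pvLss FD) count (pvRhsL FD) st).2 := by
          intro i c' r hc' hr h0 x hx
          have hic : i < count.length := by
            have := (List.getElem?_eq_some_iff.mp hc').1
            omega
          have hc : count[i]? = some count[i] := List.getElem?_eq_getElem hic
          have hils : i < (pvLss FD).length := by omega
          have hls : (pvLss FD)[i]? = some (pvLss FD)[i] := List.getElem?_eq_getElem hils
          have hgot := pvInner_get a _ _ _ st i (pvLss FD)[i] count[i] hl1 hl2 hls hc
          rw [hgot, Option.some_inj] at hc'
          cases hb : PySem.Set.contains (pvLss FD)[i] a with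
          | true =>
            simp only [hb, if_true] at hc'
            exact Or.inr (pvInner_fire a _ _ _ st i _ _ r hls hc hr hb (by omega) x hx)
          | false =>
            simp only [hb, Bool.false_eq_true, if_false] at hc'
            rcases hfired i _ r hc hr (by omega) x hx with h | h
            · exact Or.inl ((PySem.Set.mem_add ..).mpr (Or.inl h))
            · rcases List.mem_cons.mp h with rfl | h
              · exact Or.inl ((PySem.Set.mem_add ..).mpr (Or.inr rfl))
              · exact Or.inr (pvInner_st_mono a _ _ _ _ x h)
        -- soundness of the new closed set
        have hsC : ∀ x ∈ PySem.Set.add closed a, pvDer (pvPairs FD) S x := by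
          intro x hx
          rcases (PySem.Set.mem_add ..).mp hx with h | rfl
          · exact hsound x (Or.inl h)
          · exact hsound x (Or.inr (List.mem_cons_self ..))
        have hsound' : ∀ x, x ∈ PySem.Set.add closed a ∨
            x ∈ (pvInner a (pvLss FD) count (pvRhsL FD) st).2 → pvDer (pvPairs FD) S x := by
          intro x hx
          rcases hx with hx | hx
          · exact hsC x hx
          · rcases pvInner_st_mem a _ _ _ st x hx with h | ⟨i, ls, c, r, m1, m2, m3, m4, m5, m6⟩
            · exact hsound x (Or.inr (List.mem_cons_of_mem _ h))
            · obtain ⟨fd, hfd, rfl⟩ := hunls i ls m1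
              have hrr : r = pvGet1 fd := by
                rw [pvRhsL, List.getElem?_map, hfd] at m3
                simpa using m3.symm
              have hpair : (pvGet0 fd, pvGet1 fd) ∈ pvPairs FD := by
                have : (pvPairs FD)[i]? = some (pvGet0 fd, pvGet1 fd) := by
                  rw [pvPairs, List.getElem?_map, hfd]; rfl
                exact List.mem_of_getElem? this
              have hclosed0 : pvCountOf (PySem.Set.add closed a) (PySem.Set.ofList (pvGet0 fd)) = 0 := by
                rw [countOf_add closed _ a (PySem.Set.nodup_ofList _) ha,
                  ← hcnt i _ c m1 m2, if_pos ((PySem.Set.contains_iff _ _).mp m4)]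
                exact m5
              have hsub0 : ∀ y ∈ pvGet0 fd, y ∈ PySem.Set.add closed a := by
                intro y hy
                exact (countOf_eq_zero _ _).mp hclosed0 y ((PySem.Set.mem_ofList _ _).mpr hy)
              exact pvDer.step hpair (fun y hy => hsC y (hsub0 y hy)) (hrr ▸ m6)
        -- the new stack stays inside BL
        have hBL' : ∀ x ∈ (pvInner a (pvLss FD) count (pvRhsL FD) st).2, x ∈ BL := by
          intro x hx
          rcases pvInner_st_mem a _ _ _ st x hx with h | ⟨i, ls, c, r, m1, m2, m3, m4, m5, m6⟩
          · exact hBL x (List.mem_cons_of_mem _ h)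
          · obtain ⟨fd, hfd, rfl⟩ := hunls i ls m1
            have hrr : r = pvGet1 fd := by
              rw [pvRhsL, List.getElem?_map, hfd] at m3
              simpa using m3.symm
            exact hBLr fd (List.mem_of_getElem? hfd) x (hrr ▸ m6)
        -- the fuel bound
        have hfuel' : BL.countP (fun x => !PySem.Set.contains (PySem.Set.add closed a) x) *
              ((pvRhsL FD).flatten.length + 2)
            + (pvInner a (pvLss FD) count (pvRhsL FD) st).2.length ≤ fuel := by
          have hstl := pvInner_st_len a (pvLss FD) count (pvRhsL FD) st
          have hcp : BL.countP (fun x => !PySem.Set.contains (PySem.Set.add closed a) x) + 1 ≤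
              BL.countP (fun x => !PySem.Set.contains closed x) := by
            refine countP_drop BL _ _ a (hBL a (List.mem_cons_self ..)) ?_ ?_ ?_
            · intro x hx
              cases hcx : PySem.Set.contains closed x with
              | false => simp
              | true =>
                exfalso
                have hcx' : PySem.Set.contains (PySem.Set.add closed a) x = true :=
                  (PySem.Set.contains_iff _ _).mpr ((PySem.Set.mem_add ..).mpr
                    (Or.inl ((PySem.Set.contains_iff _ _).mp hcx)))
                rw [hcx'] at hx
                exact absurd hx (by decide)
            · have hf : PySem.Set.contains closed a = false := Bool.eq_false_iff.mpr hca
              rw [hf]; rfl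
            · have ht : PySem.Set.contains (PySem.Set.add closed a) a = true :=
                (PySem.Set.contains_iff _ _).mpr ((PySem.Set.mem_add ..).mpr (Or.inr rfl))
              rw [ht]; rfl
          simp only [List.length_cons] at hfuel
          have hmul := Nat.mul_le_mul_right ((pvRhsL FD).flatten.length + 2) hcp
          rw [Nat.add_mul, one_mul] at hmul
          generalize (BL.countP fun x => !PySem.Set.contains (PySem.Set.add closed a) x) *
              ((pvRhsL FD).flatten.length + 2) = X at hmul ⊢
          generalize (BL.countP fun x => !PySem.Set.contains closed x) *
              ((pvRhsL FD).flatten.length + 2) = Y at hmul hfuel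
          omega
        obtain ⟨IH1, IH2, IH3, IH4⟩ := ih _ _ _ (houtlen.trans hlen) hcnt' hfired' hsound' hBL' hfuel'
        refine ⟨fun x hx => IH1 x ((PySem.Set.mem_add ..).mpr (Or.inl hx)), ?_, IH3, IH4⟩
        intro x hx
        rcases List.mem_cons.mp hx with rfl | hx
        · exact IH1 x ((PySem.Set.mem_add ..).mpr (Or.inr rfl))
        · exact IH2 x (pvInner_st_mono a _ _ _ _ x hx)

-- ---- the two closure tests agree ----

theorem mem_coversClosed (FD : List (List (List String))) (seed : List String) (x : String) :
    x ∈ pvLoop (pvLss FD) (pvRhsL FD)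
        ((seed.length + (pvRhsL FD).flatten.length) * ((pvRhsL FD).flatten.length + 3) + 1)
        (pvCnt FD) PySem.Set.empty (pvSeed0 (pvCnt FD) (pvRhsL FD) seed.reverse)
      ↔ pvDer (pvPairs FD) seed x := by
  have hBLr : ∀ fd ∈ FD, ∀ y ∈ pvGet1 fd, y ∈ seed ++ (pvRhsL FD).flatten := by
    intro fd hfd y hy
    exact List.mem_append_right _ (List.mem_flatten.mpr
      ⟨pvGet1 fd, List.mem_map.mpr ⟨fd, hfd, rfl⟩, hy⟩)
  have hlen : (pvCnt FD).length = FD.length := by simp [pvCnt, pvLss]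
  have hcnt0 : ∀ (i : Nat) (ls : PySem.Set String) (c : Int), (pvLss FD)[i]? = some ls → (pvCnt FD)[i]? = some c →
      c = pvCountOf PySem.Set.empty ls := by
    intro i ls c hls hc
    rw [pvCnt, List.getElem?_map, hls] at hc
    simp only [Option.map_some, Option.some_inj] at hc
    rw [← hc, countOf_empty]
  have hfired0 : ∀ (i : Nat) (c : Int) (r : List String), (pvCnt FD)[i]? = some c → (pvRhsL FD)[i]? = some r → c = 0 →
      ∀ x ∈ r, x ∈ PySem.Set.empty ∨ x ∈ pvSeed0 (pvCnt FD) (pvRhsL FD) seed.reverse := by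
    intro i c r hc hr h0 y hy
    subst h0
    exact Or.inr (pvSeed0_fire _ _ _ i r hc hr y hy)
  have hsound0 : ∀ y, y ∈ PySem.Set.empty ∨ y ∈ pvSeed0 (pvCnt FD) (pvRhsL FD) seed.reverse →
      pvDer (pvPairs FD) seed y := by
    intro y hy
    rcases hy with hy | hy
    · simp [PySem.Set.empty] at hy
    · rcases pvSeed0_mem _ _ _ y hy with h | ⟨i, r, h1, h2, h3⟩
      · exact pvDer.base (List.mem_reverse.mp h)
      · rw [pvCnt, List.getElem?_map] at h1
        rcases Option.map_eq_some_iff.mp h1 with ⟨ls, hls, hlen0⟩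
        rcases Option.map_eq_some_iff.mp (by rw [pvLss, List.getElem?_map] at hls; exact hls)
          with ⟨fd, hfd, hlseq⟩
        have hr : r = pvGet1 fd := by
          rw [pvRhsL, List.getElem?_map, hfd] at h2
          simpa using h2.symm
        have hpair : (pvGet0 fd, pvGet1 fd) ∈ pvPairs FD := by
          have : (pvPairs FD)[i]? = some (pvGet0 fd, pvGet1 fd) := by
            rw [pvPairs, List.getElem?_map, hfd]; rfl
          exact List.mem_of_getElem? this
        have hls0 : ls = [] := by
          have : (ls.length : Int) = 0 := hlen0
          have : ls.length = 0 := by exact_mod_cast this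
          exact List.length_eq_zero_iff.mp this
        refine pvDer.step hpair ?_ (hr ▸ h3)
        intro z hz
        exact absurd ((PySem.Set.mem_ofList _ _).mpr hz)
          (by rw [show PySem.Set.ofList (pvGet0 fd) = ls from hlseq, hls0]; simp)
  have hBL0 : ∀ y ∈ pvSeed0 (pvCnt FD) (pvRhsL FD) seed.reverse,
      y ∈ seed ++ (pvRhsL FD).flatten := by
    intro y hy
    rcases pvSeed0_mem _ _ _ y hy with h | ⟨i, r, h1, h2, h3⟩
    · exact List.mem_append_left _ (List.mem_reverse.mp h)
    · exact List.mem_append_right _ (List.mem_flatten.mpr ⟨r, List.mem_of_getElem? h2, h3⟩)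
  have hfuel0 : (seed ++ (pvRhsL FD).flatten).countP
        (fun x => !PySem.Set.contains PySem.Set.empty x) * ((pvRhsL FD).flatten.length + 2)
      + (pvSeed0 (pvCnt FD) (pvRhsL FD) seed.reverse).length ≤
      (seed.length + (pvRhsL FD).flatten.length) * ((pvRhsL FD).flatten.length + 3) + 1 := by
    have h1 : (seed ++ (pvRhsL FD).flatten).countP
        (fun x => !PySem.Set.contains PySem.Set.empty x) ≤
        seed.length + (pvRhsL FD).flatten.length := by
      refine le_trans List.countP_le_length ?_
      simp
    have h2 : (pvSeed0 (pvCnt FD) (pvRhsL FD) seed.reverse).length ≤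
        seed.length + (pvRhsL FD).flatten.length := by
      refine le_trans (pvSeed0_len _ _ _) ?_
      simp
    have hmul := Nat.mul_le_mul_right ((pvRhsL FD).flatten.length + 2) h1
    have hms : (seed.length + (pvRhsL FD).flatten.length) * ((pvRhsL FD).flatten.length + 3) =
        (seed.length + (pvRhsL FD).flatten.length) * ((pvRhsL FD).flatten.length + 2) +
          (seed.length + (pvRhsL FD).flatten.length) := Nat.mul_succ _ _
    generalize (seed ++ (pvRhsL FD).flatten).countP
        (fun x => !PySem.Set.contains PySem.Set.empty x) * ((pvRhsL FD).flatten.length + 2) = X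
      at hmul ⊢
    generalize (seed.length + (pvRhsL FD).flatten.length) *
        ((pvRhsL FD).flatten.length + 2) = Y at hmul hms
    omega
  obtain ⟨C1, C2, C3, C4⟩ := pvLoop_go FD seed (seed ++ (pvRhsL FD).flatten) hBLr
    ((seed.length + (pvRhsL FD).flatten.length) * ((pvRhsL FD).flatten.length + 3) + 1)
    (pvCnt FD) PySem.Set.empty (pvSeed0 (pvCnt FD) (pvRhsL FD) seed.reverse)
    hlen hcnt0 hfired0 hsound0 hBL0 hfuel0
  constructor
  · exact C3 x
  · refine pvDer_min ?_ ?_ x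
    · intro y hy
      exact C2 y (pvSeed0_mono _ _ _ y (List.mem_reverse.mpr hy))
    · intro p hp hsub
      rcases List.mem_map.mp hp with ⟨fd, hfd, rfl⟩
      exact C4 fd hfd hsub

theorem covers_eq (R : List String) (FD : List (List (List String))) (c rhs : List String) :
    pvCovers (pvLss FD) (pvRhsL FD) (pvCnt FD) c rhs = pvSubsetB rhs (pvClosure R FD c) := by
  rw [Bool.eq_iff_iff]
  unfold pvCovers
  rw [PySem.Set.issubset_iff]
  simp only [pvSubsetB, List.all_eq_true, decide_eq_true_eq]
  constructor
  · intro h y hy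
    exact (mem_closA R FD c y).mpr ((mem_coversClosed FD c y).mp
      (h y ((PySem.Set.mem_ofList _ _).mpr hy)))
  · intro h y hy
    exact (mem_coversClosed FD c y).mpr ((mem_closA R FD c y).mp
      (h y ((PySem.Set.mem_ofList _ _).mp hy)))

-- ---- combinations facts ----

theorem pvCombos_eq_nil_of_gt (n : Nat) (l : List String) (h : l.length < n) :
    pvCombos n l = [] := by
  induction l generalizing n with
  | nil => cases n with
    | zero => omega
    | succ m => rfl
  | cons x xs ih =>
    cases n with
    | zero => omega
    | succ m =>
      simp only [pvCombos, List.append_eq_nil_iff, List.map_eq_nil_iff]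
      exact ⟨ih m (by simpa using h), ih (m + 1) (by simp at h; omega)⟩

theorem pvCombos_full (l : List String) : pvCombos l.length l = [l] := by
  induction l with
  | nil => rfl
  | cons x xs ih =>
    simp only [List.length_cons, pvCombos, ih, List.map]
    rw [pvCombos_eq_nil_of_gt (xs.length + 1) xs (by omega)]
    rfl

-- ---- the per-FD entries (proof-only names for the two loop bodies) ----

def pvEntryA (R : List String) (FD : List (List (List String))) (fd : List (List String)) :
    List (List String) :=
  if (pvGet0 fd).length == 1 then [pvGet0 fd, pvGet1 fd]
  else
    match (List.range' 1 (pvGet0 fd).length).findSome? (fun i =>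
        (pvCombos i (pvGet0 fd)).find? (fun itr => pvSubsetB (pvGet1 fd) (pvClosure R FD itr))) with
    | some itr => [itr, pvGet1 fd]
    | none => [pvGet0 fd, pvGet1 fd]

def pvEntryB (FD : List (List (List String))) (fd : List (List String)) :
    List (List String) :=
  match (List.range' 1 ((pvGet0 fd).length - 1)).findSome? (fun i =>
      (pvCombos i (pvGet0 fd)).find? (fun c => pvCovers (pvLss FD) (pvRhsL FD) (pvCnt FD) c (pvGet1 fd))) with
  | some c => [c, pvGet1 fd]
  | none => [pvGet0 fd, pvGet1 fd]

theorem entry_eq (R : List String) (FD : List (List (List String)))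
    (fd : List (List String)) : pvEntryA R FD fd = pvEntryB FD fd := by
  unfold pvEntryA pvEntryB
  have hpred : (fun c => pvCovers (pvLss FD) (pvRhsL FD) (pvCnt FD) c (pvGet1 fd)) =
      (fun itr => pvSubsetB (pvGet1 fd) (pvClosure R FD itr)) :=
    funext (fun c => covers_eq R FD c (pvGet1 fd))
  rw [hpred]
  cases hn : (pvGet0 fd).length with
  | zero => simp [List.range']
  | succ m =>
    cases m with
    | zero => simp [List.range']
    | succ k =>
      have hsplit : List.range' 1 (k + 2) = List.range' 1 (k + 1) ++ [k + 2] := by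
        have h2 := List.range'_concat (step := 1) (s := 1) (n := k + 1)
        have h12 : 1 + 1 * (k + 1) = k + 2 := by omega
        rw [h12] at h2
        exact h2
      simp only [beq_iff_eq, if_neg (by omega : ¬ k + 1 + 1 = 1),
        Nat.add_sub_cancel, hsplit, List.findSome?_append]
      cases hfs : (List.range' 1 (k + 1)).findSome? (fun i =>
          (pvCombos i (pvGet0 fd)).find? (fun itr => pvSubsetB (pvGet1 fd) (pvClosure R FD itr))) with
      | some c => rfl
      | none =>
        simp only [List.findSome?]
        have hfull : pvCombos (k + 2) (pvGet0 fd) = [pvGet0 fd] := by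
          have := pvCombos_full (pvGet0 fd)
          rwa [hn] at this
        rw [hfull]
        simp only [List.find?]
        cases hp : pvSubsetB (pvGet1 fd) (pvClosure R FD (pvGet0 fd)) <;> simp

theorem stepA_eq (R : List String) (FD : List (List (List String)))
    (acc : List (List (List String))) (fd : List (List String)) :
    (if ((pvGet0 fd).length == 1) = true then acc ++ [[pvGet0 fd, pvGet1 fd]]
     else
       match (List.range' 1 (pvGet0 fd).length).findSome? (fun i =>
           (pvCombos i (pvGet0 fd)).find? (fun itr => pvSubsetB (pvGet1 fd) (pvClosure R FD itr))) with
       | some itr => acc ++ [[itr, pvGet1 fd]]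
       | none => acc ++ [[pvGet0 fd, pvGet1 fd]]) = acc ++ [pvEntryA R FD fd] := by
  unfold pvEntryA
  by_cases hc : ((pvGet0 fd).length == 1) = true
  · simp [hc]
  · cases hfs : (List.range' 1 (pvGet0 fd).length).findSome? (fun i =>
        (pvCombos i (pvGet0 fd)).find? (fun itr => pvSubsetB (pvGet1 fd) (pvClosure R FD itr))) with
    | some c => simp [hc]
    | none => simp [hc]

theorem foldlA_eq_map (R : List String) (FD : List (List (List String)))
    (L : List (List (List String))) :
    simplifyLHS R FD L = L.map (pvEntryA R FD) := by
  suffices h : ∀ (L : List (List (List String))) (acc : List (List (List String))),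
      List.foldl (fun acc fd =>
        if ((pvGet0 fd).length == 1) = true then acc ++ [[pvGet0 fd, pvGet1 fd]]
        else
          match (List.range' 1 (pvGet0 fd).length).findSome? (fun i =>
              (pvCombos i (pvGet0 fd)).find? (fun itr => pvSubsetB (pvGet1 fd) (pvClosure R FD itr))) with
          | some itr => acc ++ [[itr, pvGet1 fd]]
          | none => acc ++ [[pvGet0 fd, pvGet1 fd]]) acc L = acc ++ L.map (pvEntryA R FD) by
    unfold simplifyLHS
    simpa using h L []
  intro L
  induction L with
  | nil => intro acc; simp
  | cons fd t ih =>
    intro acc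
    rw [List.foldl_cons, ih, List.map_cons, stepA_eq R FD acc fd]
    simp

-- ===== VERDICT (by name: the statement is the Claim_ definition above) =====
theorem simplifyLHS_spec : Claim_equal_simplifyLHS := by
  intro R FD L hdom hpre
  unfold Spec_simplifyLHS
  rw [foldlA_eq_map]
  have hB : simplifyLHS_alt R FD L = L.map (pvEntryB FD) := rfl
  rw [hB]
  exact List.map_congr_left (fun fd _ => entry_eq R FD fd)
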